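-- pv_equiv track=rewrite | github.com/vvvv1111vvvv/python-algorithm | code-test-practices/DFSandBFS/경쟁적전염_백준18405.py | bfs
-- ===== SOURCE A (Python) =====
-- from collections import deque
--
-- def bfs(s,x,y,graph,n,k, virous,visited):
--     count=0
--     q=deque()
--     nq=deque()
--     for i in range(1,len(virous)):
--         if len(virous[i])!=0:
--             for j in virous[i]:
--                 q.append([i, j])
--                 visited[j[0]][j[1]]=True
--     dx=[-1,0,1,0]
--     dy=[0,1,0,-1]
--     while count<s:
--         while q:
--             now=q.popleft()
--             for i in range(4):
--                 nx=now[1][0]+dx[i]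
--                 ny=now[1][1]+dy[i]
--                 if nx<1 or ny<1 or nx>n or ny>n:
--                     continue
--                 if visited[nx][ny]==True:
--                    continue
--                 graph[nx][ny]=now[0]
--                 visited[nx][ny]=True
--                 nq.append([now[0],[nx,ny]])
--         if len(nq)!=0:
--             q=deque()
--             for i in nq:
--                 q.append(i)
--             nq=deque()
--         count+=1
--     return graph[x][y]
-- ===== SOURCE B (Python) =====
-- from collections import deque
--
-- def bfs(s, x, y, graph, n, k, virous, visited):
--     # Same infection order and the same in-place mutations of graph/visited as A;
--     # a single queue carrying each cell's distance replaces A's counted level-swap loop.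
--     q = deque()
--     for i in range(1, len(virous)):
--         for j in virous[i]:
--             q.append((i, j[0], j[1], 0))
--             visited[j[0]][j[1]] = True
--     dx = (-1, 0, 1, 0)
--     dy = (0, 1, 0, -1)
--     while q:
--         v, cx, cy, d = q.popleft()
--         if d >= s:
--             break
--         for t in range(4):
--             nx = cx + dx[t]
--             ny = cy + dy[t]
--             if nx < 1 or ny < 1 or nx > n or ny > n:
--                 continue
--             if visited[nx][ny]:
--                 continue
--             graph[nx][ny] = v
--             visited[nx][ny] = True
--             q.append((v, nx, ny, d + 1))
--     return graph[x][y]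
-- ===== Notes on version B (the rewrite author's own statement) =====
-- stated objective: simpler
-- what changed: A's counted level-swap machinery (outer while count<s, inner drain loop, nq buffer copied element-by-element into a fresh deque each round) is replaced by one FIFO queue whose entries carry their infection distance; the loop stops as soon as the queue empties or a popped entry has distance >= s, producing the same infections in the same order.
import Mathlib
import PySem

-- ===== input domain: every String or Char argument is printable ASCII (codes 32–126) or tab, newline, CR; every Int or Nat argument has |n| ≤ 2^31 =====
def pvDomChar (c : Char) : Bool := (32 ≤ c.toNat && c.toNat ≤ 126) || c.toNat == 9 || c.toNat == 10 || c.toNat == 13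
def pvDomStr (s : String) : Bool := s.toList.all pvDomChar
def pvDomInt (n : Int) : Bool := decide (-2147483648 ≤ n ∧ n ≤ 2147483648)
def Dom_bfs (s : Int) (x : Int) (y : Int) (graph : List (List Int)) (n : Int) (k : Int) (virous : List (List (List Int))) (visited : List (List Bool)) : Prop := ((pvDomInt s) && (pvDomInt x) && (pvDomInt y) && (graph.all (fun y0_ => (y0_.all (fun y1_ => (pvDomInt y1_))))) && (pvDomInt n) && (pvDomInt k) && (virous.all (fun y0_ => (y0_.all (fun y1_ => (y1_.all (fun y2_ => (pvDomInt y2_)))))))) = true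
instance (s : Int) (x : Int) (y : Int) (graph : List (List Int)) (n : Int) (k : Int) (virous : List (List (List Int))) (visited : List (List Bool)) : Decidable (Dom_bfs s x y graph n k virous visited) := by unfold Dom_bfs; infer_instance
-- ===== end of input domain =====

-- B replaces A's counted level-swap double loop by one queue carrying each cell's
-- distance (objective: simpler); both mutate graph/visited identically in Python,
-- the equivalence proved here is about the return value.

-- Shared grid primitives (Python cell read xs[i][j] / write xs[i][j] = v).
-- Out-of-range read is `none` (IndexError in Python; such inputs are outside Pre_bfs).
def pvRead2 (M : List (List Bool)) (i j : Int) : Option Bool :=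
  match PySem.List.pyGet? M i with
  | none => none
  | some r => PySem.List.pyGet? r j

def pvWrite2 {α : Type} (M : List (List α)) (i j : Int) (a : α) : List (List α) :=
  PySem.List.pySetD M i (PySem.List.pySetD (PySem.List.pyGetD M i []) j a)

-- dx = [-1,0,1,0], dy = [0,1,0,-1] zipped: the four directions of the `for i in range(4)` loop.
def pvDirs : List (Int × Int) := [(-1, 0), (0, 1), (1, 0), (0, -1)]

-- ===== PORT A =====
-- body of A's source loop: q.append([i, j]); visited[j[0]][j[1]] = True
def pvMarkA (i : Int) (acc : List (Int × Int × Int) × List (List Bool)) (j : List Int) :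
    List (Int × Int × Int) × List (List Bool) :=
  let jx := PySem.List.pyGetD j 0 0
  let jy := PySem.List.pyGetD j 1 0
  (acc.1 ++ [(i, jx, jy)], pvWrite2 acc.2 jx jy true)

-- for i in range(1, len(virous)): if len(virous[i]) != 0: for j in virous[i]: …
def pvInitA (virous : List (List (List Int))) (V : List (List Bool)) :
    List (Int × Int × Int) × List (List Bool) :=
  (PySem.List.pyRange 1 (virous.length : Int) 1).foldl
    (fun acc i =>
      let lst := PySem.List.pyGetD virous i []
      if lst.length ≠ 0 then lst.foldl (pvMarkA i) acc else acc)
    ([], V)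

-- one direction of A's inner loop body; state = (graph, visited, nq)
def pvStepA (n v cx cy : Int)
    (st : List (List Int) × List (List Bool) × List (Int × Int × Int)) (dir : Int × Int) :
    List (List Int) × List (List Bool) × List (Int × Int × Int) :=
  let nx := cx + dir.1
  let ny := cy + dir.2
  if nx < 1 ∨ ny < 1 ∨ n < nx ∨ n < ny then st
  else
    match pvRead2 st.2.1 nx ny with
    | some false =>
        (pvWrite2 st.1 nx ny v, pvWrite2 st.2.1 nx ny true, st.2.2 ++ [(v, nx, ny)])
    | _ => st  -- visited (or out of range: IndexError in Python, outside Pre_bfs): continue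

-- while q: now = q.popleft(); for i in range(4): …
def pvDrainA (n : Int) :
    List (Int × Int × Int) → List (List Int) → List (List Bool) → List (Int × Int × Int) →
    List (List Int) × List (List Bool) × List (Int × Int × Int)
  | [], G, V, nq => (G, V, nq)
  | (v, cx, cy) :: rest, G, V, nq =>
      let st := pvDirs.foldl (pvStepA n v cx cy) (G, V, nq)
      pvDrainA n rest st.1 st.2.1 st.2.2

-- while count < s: … count += 1  — count goes 0,1,…; the loop runs exactly s.toNat times
def pvLevelsA (n : Int) :
    Nat → List (Int × Int × Int) → List (List Int) → List (List Bool) →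
    List (List Int) × List (List Bool)
  | 0, _, G, V => (G, V)
  | Nat.succ m, q, G, V =>
      let st := pvDrainA n q G V []
      -- if len(nq) != 0: q = copy of nq; nq = deque()   (q was drained, so else keeps q = [])
      pvLevelsA n m (if st.2.2.length ≠ 0 then st.2.2 else []) st.1 st.2.1

def bfs (s : Int) (x : Int) (y : Int) (graph : List (List Int)) (n : Int) (k : Int) (virous : List (List (List Int))) (visited : List (List Bool)) : Int :=
  let init := pvInitA virous visited
  let fin := pvLevelsA n s.toNat init.1 graph init.2
  PySem.List.pyGetD (PySem.List.pyGetD fin.1 x []) y 0  -- return graph[x][y]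

-- ===== PORT B =====
-- body of B's source loop: q.append((i, j[0], j[1], 0)); visited[j[0]][j[1]] = True
def pvMarkB (i : Int) (acc : List (Int × Int × Int × Int) × List (List Bool)) (j : List Int) :
    List (Int × Int × Int × Int) × List (List Bool) :=
  let jx := PySem.List.pyGetD j 0 0
  let jy := PySem.List.pyGetD j 1 0
  (acc.1 ++ [(i, jx, jy, 0)], pvWrite2 acc.2 jx jy true)

def pvInitB (virous : List (List (List Int))) (V : List (List Bool)) :
    List (Int × Int × Int × Int) × List (List Bool) :=
  (PySem.List.pyRange 1 (virous.length : Int) 1).foldl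
    (fun acc i => (PySem.List.pyGetD virous i []).foldl (pvMarkB i) acc)
    ([], V)

-- one direction of B's loop body; state = (graph, visited, queue-after-pop)
def pvStepB (n v cx cy d : Int)
    (st : List (List Int) × List (List Bool) × List (Int × Int × Int × Int)) (dir : Int × Int) :
    List (List Int) × List (List Bool) × List (Int × Int × Int × Int) :=
  let nx := cx + dir.1
  let ny := cy + dir.2
  if nx < 1 ∨ ny < 1 ∨ n < nx ∨ n < ny then st
  else
    match pvRead2 st.2.1 nx ny with
    | some false =>
        (pvWrite2 st.1 nx ny v, pvWrite2 st.2.1 nx ny true, st.2.2 ++ [(v, nx, ny, d + 1)])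
    | _ => st  -- visited (or out of range: IndexError in Python, outside Pre_bfs): continue

-- termination measure for B's single loop: infecting a cell flips one False in visited
def pvFalseCount (V : List (List Bool)) : Nat := (V.map (fun r => r.count false)).sum

theorem pvCount_set (r : List Bool) (b : Nat) (h : r[b]? = some false) :
    (r.set b true).count false + 1 = r.count false := by
  induction r generalizing b with
  | nil => simp at h
  | cons c t ih =>
      cases b with
      | zero =>
          simp only [List.getElem?_cons_zero, Option.some.injEq] at h
          subst h
          simp
      | succ b =>
          simp only [List.getElem?_cons_succ] at h
          have := ih b h
          simp only [List.set_cons_succ, List.count_cons]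
          omega

theorem pvSum_set (V : List (List Bool)) (a : Nat) (r : List Bool) (r' : List Bool)
    (hV : V[a]? = some r) (hr : r'.count false + 1 = r.count false) :
    pvFalseCount (V.set a r') + 1 ≤ pvFalseCount V := by
  induction V generalizing a with
  | nil => simp at hV
  | cons h0 t ih =>
      cases a with
      | zero =>
          simp only [List.getElem?_cons_zero, Option.some.injEq] at hV
          subst hV
          simp only [List.set_cons_zero, pvFalseCount, List.map_cons, List.sum_cons]
          omega
      | succ a =>
          simp only [List.getElem?_cons_succ] at hV
          have := ih a hV
          simp only [List.set_cons_succ, pvFalseCount, List.map_cons, List.sum_cons] at *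
          omega

theorem pvFalseCount_write2 (V : List (List Bool)) (i j : Int)
    (hi : 0 ≤ i) (hj : 0 ≤ j) (h : pvRead2 V i j = some false) :
    pvFalseCount (pvWrite2 V i j true) + 1 ≤ pvFalseCount V := by
  unfold pvRead2 at h
  rw [PySem.List.pyGet?_of_nonneg V hi] at h
  cases hV : V[i.toNat]? with
  | none => rw [hV] at h; simp at h
  | some r =>
      rw [hV] at h
      simp only [] at h
      rw [PySem.List.pyGet?_of_nonneg r hj] at h
      have hlen : i.toNat < V.length := by
        by_contra hc
        rw [List.getElem?_eq_none (by omega)] at hV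
        simp at hV
      unfold pvWrite2
      rw [PySem.List.pySetD_of_nonneg V _ hi,
          PySem.List.pyGetD_eq_getElem V [] hi (by omega),
          PySem.List.pySetD_of_nonneg _ _ hj]
      have hVg : V[i.toNat] = r := by
        rw [List.getElem?_eq_getElem hlen] at hV
        injection hV
      rw [hVg]
      exact pvSum_set V i.toNat r _ hV (pvCount_set r j.toNat h)

theorem pvStepB_measure (n v cx cy d : Int)
    (st : List (List Int) × List (List Bool) × List (Int × Int × Int × Int)) (dir : Int × Int) :
    5 * pvFalseCount (pvStepB n v cx cy d st dir).2.1
      + (pvStepB n v cx cy d st dir).2.2.length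
      ≤ 5 * pvFalseCount st.2.1 + st.2.2.length := by
  simp only [pvStepB]
  split
  · exact le_refl _
  · rename_i hguard
    split
    · rename_i heq
      have hm := pvFalseCount_write2 st.2.1 _ _ (by omega) (by omega) heq
      simp only [List.length_append, List.length_cons, List.length_nil]
      omega
    · exact le_refl _

theorem pvFoldB_measure (n v cx cy d : Int) (dirs : List (Int × Int))
    (st : List (List Int) × List (List Bool) × List (Int × Int × Int × Int)) :
    5 * pvFalseCount (dirs.foldl (pvStepB n v cx cy d) st).2.1
      + (dirs.foldl (pvStepB n v cx cy d) st).2.2.length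
      ≤ 5 * pvFalseCount st.2.1 + st.2.2.length := by
  induction dirs generalizing st with
  | nil => exact le_refl _
  | cons dir rest ih =>
      have h1 := pvStepB_measure n v cx cy d st dir
      have h2 := ih (pvStepB n v cx cy d st dir)
      simp only [List.foldl_cons]
      omega

-- while q: v,cx,cy,d = q.popleft(); if d >= s: break; for t in range(4): …
def pvLoopB (s n : Int) :
    List (Int × Int × Int × Int) → List (List Int) → List (List Bool) →
    List (List Int) × List (List Bool)
  | [], G, V => (G, V)
  | (v, cx, cy, d) :: rest, G, V =>
      if s ≤ d then (G, V)
      else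
        let st := pvDirs.foldl (pvStepB n v cx cy d) (G, V, rest)
        pvLoopB s n st.2.2 st.1 st.2.1
  termination_by q _ V => 5 * pvFalseCount V + q.length
  decreasing_by
    have h := pvFoldB_measure n v cx cy d pvDirs (G, V, rest)
    simp only [List.length_cons] at h ⊢
    omega

def bfs_alt (s : Int) (x : Int) (y : Int) (graph : List (List Int)) (n : Int) (k : Int) (virous : List (List (List Int))) (visited : List (List Bool)) : Int :=
  let init := pvInitB virous visited
  let fin := pvLoopB s n init.1 graph init.2
  PySem.List.pyGetD (PySem.List.pyGetD fin.1 x []) y 0  -- return graph[x][y]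

-- ===== PRECONDITION & SPEC =====
-- Pre_bfs excludes the inputs on which A raises IndexError (a source entry shorter
-- than 2 ints, a source coordinate outside visited, grids smaller than (n+1)×(n+1)
-- while an expansion can start, or graph[x][y] out of range); the grid-size clause
-- over-approximates the cells the BFS actually touches, so it also excludes a few
-- inputs on which A returns (see claim.json cites).
def Pre_bfs (s : Int) (x : Int) (y : Int) (graph : List (List Int)) (n : Int) (k : Int) (virous : List (List (List Int))) (visited : List (List Bool)) : Prop :=
  (∀ i ∈ PySem.List.pyRange 1 (virous.length : Int) 1,
     ∀ j ∈ PySem.List.pyGetD virous i [],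
       2 ≤ j.length ∧
       (pvRead2 visited (PySem.List.pyGetD j 0 0) (PySem.List.pyGetD j 1 0)).isSome) ∧
  ((1 ≤ n ∧ 1 ≤ s ∧
      ∃ i ∈ PySem.List.pyRange 1 (virous.length : Int) 1,
        PySem.List.pyGetD virous i [] ≠ ([] : List (List Int))) →
     (n < (visited.length : Int) ∧ n < (graph.length : Int) ∧
      (∀ r ∈ (visited.drop 1).take n.toNat, n < (r.length : Int)) ∧
      (∀ r ∈ (graph.drop 1).take n.toNat, n < (r.length : Int)))) ∧
  (PySem.List.pyGet? graph x).isSome ∧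
  (PySem.List.pyGet? (PySem.List.pyGetD graph x []) y).isSome

instance (s : Int) (x : Int) (y : Int) (graph : List (List Int)) (n : Int) (k : Int) (virous : List (List (List Int))) (visited : List (List Bool)) : Decidable (Pre_bfs s x y graph n k virous visited) := by unfold Pre_bfs; infer_instance

def pvWitness_bfs : Int × Int × Int × List (List Int) × Int × Int × List (List (List Int)) × List (List Bool) :=
  (1, 1, 2, [[0, 0, 0], [0, 0, 0], [0, 0, 0]], 2, 1, [[], [[1, 1]]],
   [[false, false, false], [false, false, false], [false, false, false]])

def Spec_bfs (s : Int) (x : Int) (y : Int) (graph : List (List Int)) (n : Int) (k : Int) (virous : List (List (List Int))) (visited : List (List Bool)) (out : Int) : Prop := out = bfs_alt s x y graph n k virous visited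
instance (s : Int) (x : Int) (y : Int) (graph : List (List Int)) (n : Int) (k : Int) (virous : List (List (List Int))) (visited : List (List Bool)) (out : Int) : Decidable (Spec_bfs s x y graph n k virous visited out) := by unfold Spec_bfs; infer_instance

-- ===== CLAIM (what is proved, stated in full; the proofs are below) =====
def Claim_equal_bfs : Prop := ∀ (s : Int) (x : Int) (y : Int) (graph : List (List Int)) (n : Int) (k : Int) (virous : List (List (List Int))) (visited : List (List Bool)), Dom_bfs s x y graph n k virous visited → Pre_bfs s x y graph n k virous visited → Spec_bfs s x y graph n k virous visited (bfs s x y graph n k virous visited)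

-- ===== LEMMAS AND PROOFS =====

-- tag a level queue of A with the distance d it is processed at
def pvTag (d : Int) (q : List (Int × Int × Int)) : List (Int × Int × Int × Int) :=
  q.map (fun e => (e.1, e.2.1, e.2.2, d))

theorem pvStep_rel (n v cx cy d : Int) (G : List (List Int)) (V : List (List Bool))
    (nq : List (Int × Int × Int)) (P : List (Int × Int × Int × Int)) (dir : Int × Int) :
    pvStepB n v cx cy d (G, V, P ++ pvTag (d + 1) nq) dir
      = ((pvStepA n v cx cy (G, V, nq) dir).1,
         (pvStepA n v cx cy (G, V, nq) dir).2.1,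
         P ++ pvTag (d + 1) (pvStepA n v cx cy (G, V, nq) dir).2.2) := by
  simp only [pvStepB, pvStepA]
  split
  · rfl
  · split
    · simp [pvTag]
    · rfl

theorem pvFold_rel (n v cx cy d : Int) (dirs : List (Int × Int)) :
    ∀ (G : List (List Int))
    (V : List (List Bool)) (nq : List (Int × Int × Int)) (P : List (Int × Int × Int × Int)),
    dirs.foldl (pvStepB n v cx cy d) (G, V, P ++ pvTag (d + 1) nq)
      = ((dirs.foldl (pvStepA n v cx cy) (G, V, nq)).1,
         (dirs.foldl (pvStepA n v cx cy) (G, V, nq)).2.1,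
         P ++ pvTag (d + 1) (dirs.foldl (pvStepA n v cx cy) (G, V, nq)).2.2) := by
  induction dirs with
  | nil => intro G V nq P; rfl
  | cons dir rest ih =>
      intro G V nq P
      simp only [List.foldl_cons, pvStep_rel]
      exact ih _ _ _ _

theorem pvLoopB_stop (s n d : Int) (q : List (Int × Int × Int)) (G : List (List Int))
    (V : List (List Bool)) (h : s ≤ d) : pvLoopB s n (pvTag d q) G V = (G, V) := by
  cases q with
  | nil => simp [pvTag, pvLoopB]
  | cons e rest => simp [pvTag, pvLoopB, h]

theorem pvMix (s n d : Int) (hd : d < s) (q1 : List (Int × Int × Int)) :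
    ∀ (q2 : List (Int × Int × Int)) (G : List (List Int)) (V : List (List Bool)),
    pvLoopB s n (pvTag d q1 ++ pvTag (d + 1) q2) G V
      = pvLoopB s n (pvTag (d + 1) (pvDrainA n q1 G V q2).2.2)
          (pvDrainA n q1 G V q2).1 (pvDrainA n q1 G V q2).2.1 := by
  induction q1 with
  | nil => intro q2 G V; simp [pvTag, pvDrainA]
  | cons e rest ih =>
      intro q2 G V
      obtain ⟨v, cx, cy⟩ := e
      have hs : ¬ s ≤ d := by omega
      simp only [pvTag, List.map_cons, List.cons_append, pvLoopB, hs, if_false]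
      rw [show (rest.map (fun e => (e.1, e.2.1, e.2.2, d)) : List (Int×Int×Int×Int)) = pvTag d rest from rfl,
          show (q2.map (fun e => (e.1, e.2.1, e.2.2, d+1)) : List (Int×Int×Int×Int)) = pvTag (d+1) q2 from rfl]
      rw [show pvTag d rest ++ pvTag (d+1) q2 = (pvTag d rest) ++ pvTag (d+1) q2 from rfl]
      rw [pvFold_rel n v cx cy d pvDirs G V q2 (pvTag d rest)]
      simp only [pvDrainA]
      exact ih _ _ _

theorem pvMain (s n : Int) (m : Nat) :
    ∀ (d : Int) (q : List (Int × Int × Int)) (G : List (List Int)) (V : List (List Bool)),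
    0 ≤ d → (s - d).toNat = m →
    pvLoopB s n (pvTag d q) G V = pvLevelsA n m q G V := by
  induction m with
  | zero =>
      intro d q G V h0 hm
      rw [pvLoopB_stop s n d q G V (by omega), pvLevelsA]
  | succ m ih =>
      intro d q G V h0 hm
      have hd : d < s := by omega
      have := pvMix s n d hd q [] G V
      rw [show pvTag d q = pvTag d q ++ pvTag (d+1) [] by simp [pvTag]]
      rw [this]
      simp only [pvLevelsA]
      have hq : (if (pvDrainA n q G V []).2.2.length ≠ 0 then (pvDrainA n q G V []).2.2 else [])
          = (pvDrainA n q G V []).2.2 := by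
        split
        · rfl
        · rename_i h; simp at h; rw [h]
      rw [hq]
      exact ih (d+1) _ _ _ (by omega) (by omega)

theorem pvMarkB_rel (i : Int) (qA : List (Int × Int × Int)) (V : List (List Bool)) (j : List Int) :
    pvMarkB i (pvTag 0 qA, V) j = (pvTag 0 (pvMarkA i (qA, V) j).1, (pvMarkA i (qA, V) j).2) := by
  simp [pvMarkB, pvMarkA, pvTag]

theorem pvMarkFold_rel (i : Int) (lst : List (List Int)) :
    ∀ (qA : List (Int × Int × Int)) (V : List (List Bool)),
    lst.foldl (pvMarkB i) (pvTag 0 qA, V)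
      = (pvTag 0 (lst.foldl (pvMarkA i) (qA, V)).1, (lst.foldl (pvMarkA i) (qA, V)).2) := by
  induction lst with
  | nil => intro qA V; rfl
  | cons j rest ih =>
      intro qA V
      simp only [List.foldl_cons, pvMarkB_rel]
      exact ih _ _

theorem pvInit_rel (virous : List (List (List Int))) (V : List (List Bool)) :
    pvInitB virous V = (pvTag 0 (pvInitA virous V).1, (pvInitA virous V).2) := by
  unfold pvInitB pvInitA
  generalize PySem.List.pyRange 1 (virous.length : Int) 1 = l
  suffices h : ∀ (qA : List (Int × Int × Int)) (W : List (List Bool)),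
      l.foldl (fun acc i => (PySem.List.pyGetD virous i []).foldl (pvMarkB i) acc) (pvTag 0 qA, W)
        = (pvTag 0 (l.foldl (fun acc i =>
            let lst := PySem.List.pyGetD virous i []
            if lst.length ≠ 0 then lst.foldl (pvMarkA i) acc else acc) (qA, W)).1,
           (l.foldl (fun acc i =>
            let lst := PySem.List.pyGetD virous i []
            if lst.length ≠ 0 then lst.foldl (pvMarkA i) acc else acc) (qA, W)).2) by
    exact h [] V
  induction l with
  | nil => intro qA W; rfl
  | cons i rest ih =>
      intro qA W
      simp only [List.foldl_cons]
      have hif : ∀ (acc : List (Int × Int × Int) × List (List Bool)),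
          (if (PySem.List.pyGetD virous i []).length ≠ 0
           then (PySem.List.pyGetD virous i []).foldl (pvMarkA i) acc else acc)
          = (PySem.List.pyGetD virous i []).foldl (pvMarkA i) acc := by
        intro acc
        cases hL : PySem.List.pyGetD virous i [] with
        | nil => simp
        | cons a as => simp
      rw [hif, pvMarkFold_rel]
      exact ih _ _

-- ===== VERDICT (by name: the statement is the Claim_ definition above) =====
theorem bfs_spec : Claim_equal_bfs := by
  intro s x y graph n k virous visited _ _
  simp only [Spec_bfs, bfs, bfs_alt, pvInit_rel]
  rw [pvMain s n s.toNat 0 _ _ _ le_rfl (by omega)]
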